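-- pv_equiv track=rewrite | github.com/lvzzzx/pointline | pointline/v2/research/primitives.py | _power_of_ten_digits
-- ===== SOURCE A (Python) =====
-- def _power_of_ten_digits(scale: int) -> int | None:
--     """Return decimal digits if scale is a power of 10; otherwise None."""
--     if scale <= 0:
--         return None
--     n = scale
--     digits = 0
--     while n % 10 == 0:
--         n //= 10
--         digits += 1
--     if n == 1:
--         return digits
--     return None
-- ===== SOURCE B (Python) =====
-- def _power_of_ten_digits(scale: int) -> int | None:
--     """Return decimal digits if scale is a power of 10; otherwise None."""
--     if scale <= 0:
--         return None
--     p = 1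
--     d = 0
--     while p < scale:
--         p *= 10
--         d += 1
--     return d if p == scale else None
-- ===== Notes on version B (the rewrite author's own statement) =====
-- stated objective: alternative
-- what changed: B searches upward for the smallest power of ten that is at least scale by repeatedly multiplying an accumulator by ten, returning the exponent iff that power equals scale, instead of A's stripping of trailing zeros by repeated floor-division with a final unit test.
import Mathlib
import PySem

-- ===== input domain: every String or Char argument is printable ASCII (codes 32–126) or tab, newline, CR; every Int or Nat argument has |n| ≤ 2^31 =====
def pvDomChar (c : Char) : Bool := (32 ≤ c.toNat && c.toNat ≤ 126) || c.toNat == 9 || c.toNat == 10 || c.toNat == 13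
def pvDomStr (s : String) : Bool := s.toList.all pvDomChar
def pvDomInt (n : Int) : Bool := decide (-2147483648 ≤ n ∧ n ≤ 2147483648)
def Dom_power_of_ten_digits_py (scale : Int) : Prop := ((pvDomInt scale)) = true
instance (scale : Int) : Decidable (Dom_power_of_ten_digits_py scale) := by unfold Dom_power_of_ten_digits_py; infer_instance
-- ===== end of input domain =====

-- B replaces A's strip-trailing-zeros division loop by a multiply-up search for the
-- smallest power of ten ≥ scale (objective: alternative algorithm of the same cost).

-- ===== PORT A =====
-- 'while n % 10 == 0: n //= 10; digits += 1'; the '0 < n' conjunct only makes the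
-- Lean recursion total — it always holds when the loop is entered from the port below.
def pvALoop (n digits : Int) : Int × Int :=
  if h : 0 < n ∧ PySem.Int.mod n 10 = 0 then
    pvALoop (PySem.Int.floordiv n 10) (digits + 1)
  else
    (n, digits)
termination_by n.toNat
decreasing_by
  obtain ⟨m, hm⟩ := (PySem.Int.mod_eq_zero_iff_dvd _ _).mp h.2
  rw [PySem.Int.floordiv_eq_ediv_of_pos (by norm_num), hm,
    Int.mul_ediv_cancel_left _ (by norm_num)]
  omega

def power_of_ten_digits_py (scale : Int) : Option Int :=
  if scale ≤ 0 then none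
  else
    let r := pvALoop scale 0
    if r.1 = 1 then some r.2 else none

-- ===== PORT B =====
-- 'while p < scale: p *= 10; d += 1'; the '0 < p' conjunct only makes the
-- recursion total — p starts at 1 and only grows.
def pvBLoop (p d scale : Int) : Int × Int :=
  if h : 0 < p ∧ p < scale then
    pvBLoop (p * 10) (d + 1) scale
  else
    (p, d)
termination_by (scale - p).toNat
decreasing_by
  have : p + 1 ≤ p * 10 := by nlinarith [h.1]
  omega

def power_of_ten_digits_py_alt (scale : Int) : Option Int :=
  if scale ≤ 0 then none
  else
    let r := pvBLoop 1 0 scale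
    if r.1 = scale then some r.2 else none

-- ===== PRECONDITION & SPEC =====
def Spec_power_of_ten_digits_py (scale : Int) (out : Option Int) : Prop := out = power_of_ten_digits_py_alt scale
instance (scale : Int) (out : Option Int) : Decidable (Spec_power_of_ten_digits_py scale out) := by unfold Spec_power_of_ten_digits_py; infer_instance

-- ===== CLAIM (what is proved, stated in full; the proofs are below) =====
def Claim_equal_power_of_ten_digits_py : Prop := ∀ (scale : Int), Dom_power_of_ten_digits_py scale → Spec_power_of_ten_digits_py scale (power_of_ten_digits_py scale)

-- ===== LEMMAS AND PROOFS =====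

-- A's loop strips all zeros from 10^k, ending at 1 having counted k.
lemma pvALoop_pow (k : Nat) : ∀ d : Int, pvALoop ((10 : Int) ^ k) d = (1, d + k) := by
  induction k with
  | zero => intro d; rw [pvALoop]; simp [PySem.Int.mod]
  | succ k ih =>
    intro d
    rw [pvALoop]
    have hpos : (0 : Int) < 10 ^ (k + 1) := by positivity
    have hdvd : (10 : Int) ∣ 10 ^ (k + 1) := dvd_pow_self 10 (Nat.succ_ne_zero k)
    have hmod : PySem.Int.mod ((10 : Int) ^ (k + 1)) 10 = 0 :=
      (PySem.Int.mod_eq_zero_iff_dvd _ _).mpr hdvd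
    rw [dif_pos ⟨hpos, hmod⟩]
    have hdiv : PySem.Int.floordiv ((10 : Int) ^ (k + 1)) 10 = 10 ^ k := by
      rw [PySem.Int.floordiv_eq_ediv_of_pos (by norm_num), pow_succ]
      exact Int.mul_ediv_cancel _ (by norm_num)
    rw [hdiv, ih]
    congr 1
    push_cast
    ring

-- If n > 0 is not a power of ten, A's loop never ends at 1.
lemma pvALoop_ne_one : ∀ (n d : Int), 0 < n → (∀ k : Nat, n ≠ 10 ^ k) → (pvALoop n d).1 ≠ 1 := by
  intro n d
  induction n, d using pvALoop.induct with
  | case1 n d h ih =>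
    intro _ hnp
    rw [pvALoop, dif_pos h]
    have hdvd : (10 : Int) ∣ n := (PySem.Int.mod_eq_zero_iff_dvd _ _).mp h.2
    obtain ⟨m, rfl⟩ := hdvd
    have hdiv : PySem.Int.floordiv ((10 : Int) * m) 10 = m := by
      rw [PySem.Int.floordiv_eq_ediv_of_pos (by norm_num)]
      exact Int.mul_ediv_cancel_left _ (by norm_num)
    have hm : 0 < m := by nlinarith [h.1]
    have hmnp : ∀ k : Nat, m ≠ 10 ^ k := by
      intro k hk
      exact hnp (k + 1) (by rw [hk, pow_succ]; ring)
    rw [hdiv] at ih ⊢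
    exact ih hm hmnp
  | case2 n d h =>
    intro hn hnp
    rw [pvALoop, dif_neg h]
    intro h1
    exact hnp 0 (by simpa using h1)

-- B's loop climbs 10^j up to 10^(j+m), counting m.
lemma pvBLoop_pow (m : Nat) : ∀ (j : Nat) (d : Int),
    pvBLoop ((10 : Int) ^ j) d ((10 : Int) ^ (j + m)) = ((10 : Int) ^ (j + m), d + m) := by
  induction m with
  | zero => intro j d; rw [pvBLoop]; simp
  | succ m ih =>
    intro j d
    rw [pvBLoop]
    have hlt : (10 : Int) ^ j < 10 ^ (j + (m + 1)) :=
      pow_lt_pow_right₀ (by norm_num) (by omega)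
    rw [dif_pos ⟨by positivity, hlt⟩]
    have h1 : (10 : Int) ^ j * 10 = 10 ^ (j + 1) := by rw [pow_succ]
    have h2 : j + 1 + m = j + (m + 1) := by omega
    rw [h1]
    have := ih (j + 1) (d + 1)
    rw [h2] at this
    rw [this]
    congr 1
    push_cast
    ring

-- Starting from a power of ten, B's loop ends on a power of ten.
lemma pvBLoop_result_pow : ∀ (p d scale : Int), (∃ j : Nat, p = 10 ^ j) →
    ∃ m : Nat, (pvBLoop p d scale).1 = 10 ^ m := by
  intro p d scale
  induction p, d using pvBLoop.induct scale with
  | case1 p d h ih =>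
    rintro ⟨j, rfl⟩
    rw [pvBLoop, dif_pos h]
    exact ih ⟨j + 1, by rw [pow_succ]⟩
  | case2 p d h =>
    intro hp
    rw [pvBLoop, dif_neg h]
    exact hp

-- ===== VERDICT (by name: the statement is the Claim_ definition above) =====
theorem power_of_ten_digits_py_spec : Claim_equal_power_of_ten_digits_py := by
  intro scale _
  unfold Spec_power_of_ten_digits_py power_of_ten_digits_py power_of_ten_digits_py_alt
  by_cases hs : scale ≤ 0
  · simp [hs]
  · rw [if_neg hs, if_neg hs]
    have hpos : 0 < scale := by omega
    by_cases hp : ∃ k : Nat, scale = 10 ^ k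
    · obtain ⟨k, rfl⟩ := hp
      rw [pvALoop_pow k 0]
      have hb := pvBLoop_pow k 0 0
      simp only [Nat.zero_add, pow_zero] at hb
      rw [hb]
      simp
    · push Not at hp
      have ha := pvALoop_ne_one scale 0 hpos hp
      obtain ⟨m, hm⟩ := pvBLoop_result_pow 1 0 scale ⟨0, by norm_num⟩
      have hb : (pvBLoop 1 0 scale).1 ≠ scale := by
        rw [hm]; exact fun h => hp m h.symm
      simp [ha, hb]
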